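-- pv_equiv track=rewrite | github.com/michaelwp/hacker-rank | Duplicated_Products/DuplicatedProducts.py | numDuplicates
-- ===== SOURCE A (Python) =====
-- def numDuplicates(names, prices, weights):
--     x = []
--     for i in range(len(names)):
--         x.append(names[i]+str(prices[i])+str(weights[i]))
--
--     res = {}
--     d = 0
--     r = 0
--     for ye in x:
--         for xe in x:
--             if (xe == ye):
--                 d+=1
--         if (d > 1):
--             res[ye] = d
--         d = 0
--
--     for e in res:
--         r = r + (res[e])
--
--     return r
-- ===== SOURCE B (Python) =====
-- def numDuplicates(names, prices, weights):
--     # One pass with a hash counter instead of A's nested repeated-scan counting.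
--     combined = [names[i] + str(prices[i]) + str(weights[i]) for i in range(len(names))]
--     counts = {}
--     for s in combined:
--         counts[s] = counts.get(s, 0) + 1
--     return sum(c for c in counts.values() if c > 1)
-- ===== Notes on version B (the rewrite author's own statement) =====
-- stated objective: faster
-- what changed: Replaces A's quadratic nested scan (recounting the whole list for every element) and duplicate-filtering dict with a single counting pass over a hash dict, then sums the counts greater than one.
import Mathlib
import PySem

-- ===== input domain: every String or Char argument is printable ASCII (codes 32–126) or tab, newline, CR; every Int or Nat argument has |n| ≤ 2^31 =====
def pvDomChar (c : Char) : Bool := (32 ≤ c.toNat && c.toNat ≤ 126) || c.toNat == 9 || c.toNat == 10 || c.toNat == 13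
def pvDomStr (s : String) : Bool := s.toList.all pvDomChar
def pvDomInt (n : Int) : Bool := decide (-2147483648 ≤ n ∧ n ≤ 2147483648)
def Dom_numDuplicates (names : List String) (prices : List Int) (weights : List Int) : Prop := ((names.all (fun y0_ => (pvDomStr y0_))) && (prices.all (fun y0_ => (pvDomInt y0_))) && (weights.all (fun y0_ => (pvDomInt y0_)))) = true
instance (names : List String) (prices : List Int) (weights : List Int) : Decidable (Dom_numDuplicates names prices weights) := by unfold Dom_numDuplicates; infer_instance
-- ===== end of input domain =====

-- B replaces A's quadratic nested-scan counting with a single hash-counter pass; return values proved equal (A mutates nothing).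


-- ===== PORT A =====
-- x.append(names[i]+str(prices[i])+str(weights[i])) ; pyGet? is exact (none = IndexError, excluded by Pre_)
def pvBuild (names : List String) (prices : List Int) (weights : List Int) : List String :=
  (PySem.List.pyRange 0 (names.length : Int) 1).foldl
    (fun acc i =>
      acc ++ [((PySem.List.pyGet? names i).getD "")
               ++ PySem.Int.toStr ((PySem.List.pyGet? prices i).getD 0)
               ++ PySem.Int.toStr ((PySem.List.pyGet? weights i).getD 0)]) []

def numDuplicates (names : List String) (prices : List Int) (weights : List Int) : Int :=
  let x := pvBuild names prices weights
  let res := x.foldl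
    (fun res ye =>
      let d := x.foldl (fun d xe => if xe == ye then d + 1 else d) (0 : Int)
      if d > 1 then res.insert ye d else res)
    (PySem.Dict.empty : PySem.Dict String Int)
  -- for e in res: r = r + res[e]   (e is always a key, so the lookup never raises)
  res.keys.foldl (fun r e => r + res.getD e 0) (0 : Int)

-- ===== PORT B =====
def numDuplicates_alt (names : List String) (prices : List Int) (weights : List Int) : Int :=
  let combined := (PySem.List.pyRange 0 (names.length : Int) 1).map
    (fun i => ((PySem.List.pyGet? names i).getD "")
               ++ PySem.Int.toStr ((PySem.List.pyGet? prices i).getD 0)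
               ++ PySem.Int.toStr ((PySem.List.pyGet? weights i).getD 0))
  let counts := combined.foldl (fun d s => d.insert s (d.getD s 0 + 1))
    (PySem.Dict.empty : PySem.Dict String Int)
  ((counts.values.filter (fun c => c > 1)).sum)

-- ===== PRECONDITION & SPEC =====
-- Pre_ excludes exactly the inputs where A raises IndexError: prices or weights shorter than names.
def Pre_numDuplicates (names : List String) (prices : List Int) (weights : List Int) : Prop :=
  names.length ≤ prices.length ∧ names.length ≤ weights.length
instance (names : List String) (prices : List Int) (weights : List Int) : Decidable (Pre_numDuplicates names prices weights) := by unfold Pre_numDuplicates; infer_instance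
def pvWitness_numDuplicates : List String × List Int × List Int := (["a", "a", "b"], [1, 1, 2], [3, 3, 4])

def Spec_numDuplicates (names : List String) (prices : List Int) (weights : List Int) (out : Int) : Prop := out = numDuplicates_alt names prices weights
instance (names : List String) (prices : List Int) (weights : List Int) (out : Int) : Decidable (Spec_numDuplicates names prices weights out) := by unfold Spec_numDuplicates; infer_instance

-- ===== CLAIM (what is proved, stated in full; the proofs are below) =====
def Claim_equal_numDuplicates : Prop := ∀ (names : List String) (prices : List Int) (weights : List Int), Dom_numDuplicates names prices weights → Pre_numDuplicates names prices weights → Spec_numDuplicates names prices weights (numDuplicates names prices weights)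

-- ===== LEMMAS AND PROOFS =====

-- A's res dict after the counting loop, characterised: entries are the distinct duplicated
-- strings in first-occurrence order, each mapped to its total count.
theorem pv_dictAux (c : String → Int) (l : List String) :
    ∀ (s : PySem.Set String), s.Nodup →
      l.foldl (fun d ye => if 1 < c ye then d.insert ye (c ye) else d)
        (PySem.Dict.mk ((s.filter (fun e => decide (1 < c e))).map (fun e => (e, c e))))
      = PySem.Dict.mk (((PySem.Set.update s l).filter (fun e => decide (1 < c e))).map (fun e => (e, c e))) := by
  induction l with
  | nil => intro s _; rfl
  | cons x t ih =>
    intro s hs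
    have hstep :
        (if 1 < c x then (PySem.Dict.mk ((s.filter (fun e => decide (1 < c e))).map (fun e => (e, c e)))).insert x (c x)
         else (PySem.Dict.mk ((s.filter (fun e => decide (1 < c e))).map (fun e => (e, c e)))))
        = PySem.Dict.mk (((s.add x).filter (fun e => decide (1 < c e))).map (fun e => (e, c e))) := by
      by_cases hcx : 1 < c x
      · -- duplicated element: insert (overwrite an identical entry, or append a fresh one)
        by_cases hmem : x ∈ s
        · have hL : x ∈ s.filter (fun e => decide (1 < c e)) :=
            List.mem_filter.mpr ⟨hmem, by simpa using hcx⟩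
          have hcont : (PySem.Dict.mk ((s.filter (fun e => decide (1 < c e))).map (fun e => (e, c e)))).contains x = true := by
            rw [PySem.Dict.contains_eq_decide_mem_keys]
            simp only [PySem.Dict.keys, List.map_map]
            simpa using hL
          rw [if_pos hcx, PySem.Set.add_of_mem hmem]
          apply PySem.Dict.ext
          rw [PySem.Dict.items_insert_of_contains _ _ hcont]
          simp only [List.map_map]
          refine List.map_congr_left ?_
          intro e _
          simp only [Function.comp]
          by_cases hex : e = x
          · subst hex; simp
          · simp [hex]
        · have hL : x ∉ s.filter (fun e => decide (1 < c e)) := fun h => hmem (List.mem_filter.mp h).1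
          have hcont : (PySem.Dict.mk ((s.filter (fun e => decide (1 < c e))).map (fun e => (e, c e)))).contains x = false := by
            rw [PySem.Dict.contains_eq_decide_mem_keys]
            simp only [PySem.Dict.keys, List.map_map]
            simpa using hL
          rw [if_pos hcx, PySem.Set.add_of_not_mem hmem]
          apply PySem.Dict.ext
          rw [PySem.Dict.items_insert_of_not_contains _ _ hcont]
          simp [List.filter_append, hcx]
      · -- not duplicated: the dict is unchanged, and the filter drops x from the set side too
        rw [if_neg hcx]
        by_cases hmem : x ∈ s
        · rw [PySem.Set.add_of_mem hmem]
        · rw [PySem.Set.add_of_not_mem hmem]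
          simp [List.filter_append, hcx]
    simpa [List.foldl_cons, hstep, PySem.Set.update] using ih (s.add x) (PySem.Set.nodup_add s x hs)

theorem pv_res_eq (x : List String) :
    x.foldl (fun d ye => if 1 < (x.count ye : Int) then d.insert ye ((x.count ye : Int)) else d)
      (PySem.Dict.empty : PySem.Dict String Int)
    = PySem.Dict.mk (((PySem.Set.ofList x).filter (fun e => decide (1 < (x.count e : Int)))).map (fun e => (e, (x.count e : Int)))) := by
  simpa [PySem.Set.update, PySem.Set.ofList, PySem.Dict.empty] using
    pv_dictAux (fun e => (x.count e : Int)) x PySem.Set.empty (by simp [PySem.Set.empty])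


-- the common combined list; both loop bodies over it compute the same total
theorem pv_core (x : List String) :
    (fun res => res.keys.foldl (fun r e => r + res.getD e 0) (0 : Int))
      (x.foldl
        (fun res ye =>
          let d := x.foldl (fun d xe => if xe == ye then d + 1 else d) (0 : Int)
          if d > 1 then res.insert ye d else res)
        (PySem.Dict.empty : PySem.Dict String Int))
    = (((x.foldl (fun d s => d.insert s (d.getD s 0 + 1))
          (PySem.Dict.empty : PySem.Dict String Int)).values.filter (fun c => c > 1)).sum) := by
  -- A side: inner scan is x.count, then the characterisation of the res dict
  have hA : (x.foldl
        (fun res ye =>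
          let d := x.foldl (fun d xe => if xe == ye then d + 1 else d) (0 : Int)
          if d > 1 then res.insert ye d else res)
        (PySem.Dict.empty : PySem.Dict String Int))
      = PySem.Dict.mk (((PySem.Set.ofList x).filter (fun e => decide (1 < (x.count e : Int)))).map
          (fun e => (e, (x.count e : Int)))) := by
    rw [← pv_res_eq x]
    apply PySem.List.foldl_congr_mem
    intro acc ye _
    simp only [PySem.List.foldl_beq_add_one, zero_add, gt_iff_lt]
  rw [hA]
  set L := (PySem.Set.ofList x).filter (fun e => decide (1 < (x.count e : Int))) with hLdef
  have hLnodup : L.Nodup := (PySem.Set.nodup_ofList x).filter _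
  have hkeys : (PySem.Dict.mk (L.map (fun e => (e, (x.count e : Int))))).keys = L := by
    simp [PySem.Dict.keys, List.map_map, Function.comp_def]
  dsimp only
  rw [hkeys, PySem.List.foldl_add, zero_add]
  have hmapA : L.map (fun e => (PySem.Dict.mk (L.map (fun e => (e, (x.count e : Int))))).getD e 0)
      = L.map (fun e => (x.count e : Int)) := by
    refine List.map_congr_left ?_
    intro e he
    exact PySem.Dict.getD_of_mem_items _ (List.mem_map_of_mem (f := fun e => (e, (x.count e : Int))) he) (by rw [hkeys]; exact hLnodup) 0
  rw [hmapA]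
  -- B side: the counting loop is Counter(x); its values are the counts of the distinct elements
  rw [PySem.Dict.foldl_insert_getD_add_one_eq_counter]
  have hvals : (PySem.Dict.counter x).values
      = (PySem.Set.ofList x).map (fun e => (x.count e : Int)) := by
    simp [PySem.Dict.values, PySem.Dict.items_counter, List.map_map, Function.comp_def]
  rw [hvals, List.filter_map]
  rfl

-- ===== VERDICT (by name: the statement is the Claim_ definition above) =====
theorem numDuplicates_spec : Claim_equal_numDuplicates := by
  intro names prices weights _ _
  show numDuplicates names prices weights = numDuplicates_alt names prices weights
  simp only [numDuplicates, numDuplicates_alt, pvBuild,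
    PySem.List.foldl_append_singleton_eq_map, List.nil_append]
  exact pv_core _
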